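-- pv_equiv track=rewrite | github.com/hayleybrid/data_structures | data/minpurchase.py | min_purchases_for_candles
-- ===== SOURCE A (Python) =====
-- def min_purchases_for_candles(stack, K):
--     """
--     Returns the minimum number of boxes Mary must buy from the top
--     so that she has at least one copy of each candle 1..K.
--     If impossible (some number in 1..K not present), returns -1.
--
--     :param stack: list[int] representing the stack from top (index 0) to bottom
--     :param K: highest numbered candle Mary needs (needs 1..K)
--     :return: minimal number of boxes to buy, or -1 if impossible
--     """
--     if K <= 0:
--         return 0  # nothing required
--
--     seen = [False] * (K + 1)  # index 0 unused
--     remain = K  # number of distinct required candles still needed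
--
--     for i, val in enumerate(stack):
--         if 1 <= val <= K:
--             if not seen[val]:
--                 seen[val] = True
--                 remain -= 1
--                 if remain == 0:
--                     # i is 0-based; number of purchases is i+1
--                     return i + 1
--         # ignore irrelevant values outside 1..K
--
--     # some required candles missing
--     return -1
-- ===== SOURCE B (Python) =====
-- def min_purchases_for_candles(stack, K):
--     """Same result via a first-appearance table: record each required candle's
--     first index in one pass, then the answer is the latest such index + 1."""
--     if K <= 0:
--         return 0
--     first_pos = {}
--     for i, val in enumerate(stack):
--         if 1 <= val <= K and val not in first_pos:
--             first_pos[val] = i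
--     best = -1
--     for c in range(1, K + 1):
--         if c not in first_pos:
--             return -1
--         best = max(best, first_pos[c])
--     return best + 1
-- ===== Notes on version B (the rewrite author's own statement) =====
-- stated objective: alternative
-- what changed: Replaces A's seen-array with countdown counter and mid-loop early return by a one-pass first-appearance dict followed by a max-reduction over the required candles 1..K (answer = latest first appearance + 1, or -1 if one is missing).
import Mathlib
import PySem

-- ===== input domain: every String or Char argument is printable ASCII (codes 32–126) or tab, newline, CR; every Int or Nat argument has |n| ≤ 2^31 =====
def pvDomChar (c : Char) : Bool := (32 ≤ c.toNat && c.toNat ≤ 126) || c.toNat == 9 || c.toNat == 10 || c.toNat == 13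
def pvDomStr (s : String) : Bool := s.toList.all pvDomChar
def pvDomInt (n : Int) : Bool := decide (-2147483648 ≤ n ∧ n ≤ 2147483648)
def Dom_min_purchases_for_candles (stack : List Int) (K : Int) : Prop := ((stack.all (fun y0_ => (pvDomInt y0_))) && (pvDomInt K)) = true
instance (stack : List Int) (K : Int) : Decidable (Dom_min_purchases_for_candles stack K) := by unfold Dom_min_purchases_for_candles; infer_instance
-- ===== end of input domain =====

-- B replaces A's seen-array countdown with a first-appearance table and a max-reduction (alternative decomposition, same cost).

-- ===== PORT A =====
-- countdown loop over (index, value); seen is the Python list [False]*(K+1)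
def pvLoopA (K : Int) : List Int → Int → List Bool → Int → Int
  | [], _, _, _ => -1
  | val :: rest, i, seen, remain =>
    if 1 ≤ val ∧ val ≤ K then
      if PySem.List.pyGetD seen val false = false then
        let seen' := PySem.List.pySetD seen val true
        let remain' := remain - 1
        if remain' = 0 then i + 1
        else pvLoopA K rest (i + 1) seen' remain'
      else pvLoopA K rest (i + 1) seen remain
    else pvLoopA K rest (i + 1) seen remain

def min_purchases_for_candles (stack : List Int) (K : Int) : Int :=
  if K ≤ 0 then 0
  else pvLoopA K stack 0 (List.replicate (K + 1).toNat false) K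

-- ===== PORT B =====
-- one pass recording each required candle's first index
def pvBuildB (K : Int) : List Int → Int → PySem.Dict Int Int → PySem.Dict Int Int
  | [], _, d => d
  | val :: rest, i, d =>
    if 1 ≤ val ∧ val ≤ K ∧ d.contains val = false then
      pvBuildB K rest (i + 1) (d.insert val i)
    else pvBuildB K rest (i + 1) d

-- the for-c-in-range loop: early return -1 on a missing candle, else max-accumulate
def pvReduceB (d : PySem.Dict Int Int) : List Int → Int → Int
  | [], best => best + 1
  | c :: rest, best =>
    if d.contains c = false then -1
    else pvReduceB d rest (max best (d.getD c 0))

def min_purchases_for_candles_alt (stack : List Int) (K : Int) : Int :=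
  if K ≤ 0 then 0
  else pvReduceB (pvBuildB K stack 0 PySem.Dict.empty) (PySem.List.pyRange 1 (K + 1) 1) (-1)

-- ===== PRECONDITION & SPEC =====
def Spec_min_purchases_for_candles (stack : List Int) (K : Int) (out : Int) : Prop := out = min_purchases_for_candles_alt stack K
instance (stack : List Int) (K : Int) (out : Int) : Decidable (Spec_min_purchases_for_candles stack K out) := by unfold Spec_min_purchases_for_candles; infer_instance

-- ===== CLAIM (what is proved, stated in full; the proofs are below) =====
def Claim_equal_min_purchases_for_candles : Prop := ∀ (stack : List Int) (K : Int), Dom_min_purchases_for_candles stack K → Spec_min_purchases_for_candles stack K (min_purchases_for_candles stack K)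

-- ===== LEMMAS AND PROOFS =====

-- the required candles not yet recorded in d (proof-only device)
noncomputable def pvMissing (K : Int) (d : PySem.Dict Int Int) : Finset Int :=
  (Finset.Icc 1 K).filter (fun c => d.get? c = none)

lemma pv_mem_missing (K : Int) (d : PySem.Dict Int Int) (c : Int) :
    c ∈ pvMissing K d ↔ (1 ≤ c ∧ c ≤ K) ∧ d.get? c = none := by
  simp [pvMissing]

lemma pv_loopA_cons (K val : Int) (rest : List Int) (i : Int) (seen : List Bool) (remain : Int) :
    pvLoopA K (val :: rest) i seen remain =
      if 1 ≤ val ∧ val ≤ K then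
        if PySem.List.pyGetD seen val false = false then
          if remain - 1 = 0 then i + 1
          else pvLoopA K rest (i + 1) (PySem.List.pySetD seen val true) (remain - 1)
        else pvLoopA K rest (i + 1) seen remain
      else pvLoopA K rest (i + 1) seen remain := rfl

lemma pv_buildB_cons (K val : Int) (rest : List Int) (i : Int) (d : PySem.Dict Int Int) :
    pvBuildB K (val :: rest) i d =
      if 1 ≤ val ∧ val ≤ K ∧ d.contains val = false then
        pvBuildB K rest (i + 1) (d.insert val i)
      else pvBuildB K rest (i + 1) d := rfl

lemma pv_reduceB_cons (d : PySem.Dict Int Int) (c : Int) (rest : List Int) (best : Int) :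
    pvReduceB d (c :: rest) best =
      if d.contains c = false then -1 else pvReduceB d rest (max best (d.getD c 0)) := rfl

lemma pv_getD_setD (xs : List Bool) (b c : Int) (v dft : Bool)
    (hb0 : 0 ≤ b) (_hb : b < (xs.length : Int)) (hc0 : 0 ≤ c) (hc : c < (xs.length : Int)) :
    PySem.List.pyGetD (PySem.List.pySetD xs b v) c dft = if c = b then v else PySem.List.pyGetD xs c dft := by
  rw [PySem.List.pySetD_of_nonneg _ _ hb0,
      PySem.List.pyGetD_eq_getElem _ _ hc0 (by simpa using hc),
      PySem.List.pyGetD_eq_getElem _ _ hc0 (by simpa using hc)]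
  rw [List.getElem_set]
  by_cases h : c = b
  · simp [h]
  · have hne : b.toNat ≠ c.toNat := by omega
    simp [h, hne]

lemma pv_reduce_missing (d : PySem.Dict Int Int) (cs : List Int) (best : Int)
    (h : ∃ c ∈ cs, d.contains c = false) : pvReduceB d cs best = -1 := by
  induction cs generalizing best with
  | nil => rcases h with ⟨c, hc, _⟩; cases hc
  | cons c rest ih =>
    by_cases hc : d.contains c = false
    · rw [pv_reduceB_cons, if_pos hc]
    · rcases h with ⟨c', hc', h'⟩
      rcases List.mem_cons.mp hc' with rfl | hmem
      · exact absurd h' hc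
      · rw [pv_reduceB_cons, if_neg hc]
        exact ih _ ⟨c', hmem, h'⟩

lemma pv_reduce_all (d : PySem.Dict Int Int) (i : Int) (cs : List Int) (best : Int)
    (hall : ∀ c ∈ cs, d.contains c = true ∧ d.getD c 0 ≤ i)
    (hbest : best ≤ i)
    (hwit : best = i ∨ ∃ c ∈ cs, d.getD c 0 = i) :
    pvReduceB d cs best = i + 1 := by
  induction cs generalizing best with
  | nil =>
    rcases hwit with h | ⟨c, hc, _⟩
    · simp [pvReduceB, h]
    · cases hc
  | cons c rest ih =>
    obtain ⟨hc, hle⟩ := hall c (by simp)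
    rw [pv_reduceB_cons, if_neg (by simp [hc])]
    apply ih
    · exact fun c' hc' => hall c' (List.mem_cons_of_mem _ hc')
    · exact max_le hbest hle
    · rcases hwit with h | ⟨c', hc', h'⟩
      · left; omega
      · rcases List.mem_cons.mp hc' with rfl | hmem
        · left; omega
        · right; exact ⟨c', hmem, h'⟩

lemma pv_build_noop (K : Int) (d : PySem.Dict Int Int)
    (h : ∀ c, 1 ≤ c → c ≤ K → d.contains c = true)
    (rest : List Int) : ∀ (i : Int), pvBuildB K rest i d = d := by
  induction rest with
  | nil => intro i; rfl
  | cons val rest ih =>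
    intro i
    have hguard : ¬ (1 ≤ val ∧ val ≤ K ∧ d.contains val = false) := by
      rintro ⟨h1, h2, h3⟩
      rw [h val h1 h2] at h3; cases h3
    rw [pv_buildB_cons, if_neg hguard]
    exact ih (i + 1)

lemma pv_missing_insert (K : Int) (d : PySem.Dict Int Int) (val i : Int) :
    pvMissing K (d.insert val i) = (pvMissing K d).erase val := by
  ext c
  simp only [pv_mem_missing, Finset.mem_erase, pv_mem_missing, PySem.Dict.get?_insert]
  by_cases hc : c = val
  · simp [hc]
  · simp [hc]

lemma pv_main (K : Int) (_hK : 1 ≤ K) (rest : List Int) :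
    ∀ (i : Int) (seen : List Bool) (d : PySem.Dict Int Int),
      0 ≤ i →
      (seen.length : Int) = K + 1 →
      (∀ c, 1 ≤ c → c ≤ K → PySem.List.pyGetD seen c false = d.contains c) →
      (∀ c p, d.get? c = some p → 0 ≤ p ∧ p < i) →
      (pvMissing K d).Nonempty →
      pvLoopA K rest i seen ((pvMissing K d).card : Int)
        = pvReduceB (pvBuildB K rest i d) (PySem.List.pyRange 1 (K + 1) 1) (-1) := by
  induction rest with
  | nil =>
    intro i seen d _ _ _ _ hne
    obtain ⟨c, hc⟩ := hne
    rw [pv_mem_missing] at hc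
    refine (pv_reduce_missing _ _ _ ⟨c, ?_, ?_⟩).symm
    · rw [PySem.List.mem_pyRange_one]; omega
    · rw [← PySem.Dict.get?_eq_none_iff_contains]; exact hc.2
  | cons val rest ih =>
    intro i seen d hi hlen hcorr hpos hne
    by_cases hrange : 1 ≤ val ∧ val ≤ K
    · obtain ⟨h1, h2⟩ := hrange
      by_cases hseen : PySem.List.pyGetD seen val false = false
      · -- new candle
        have hcont : d.contains val = false := by rw [← hcorr val h1 h2]; exact hseen
        have hnone : d.get? val = none := (PySem.Dict.get?_eq_none_iff_contains d val).mpr hcont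
        have hvm : val ∈ pvMissing K d := (pv_mem_missing K d val).mpr ⟨⟨h1, h2⟩, hnone⟩
        have hmins := pv_missing_insert K d val i
        have hcard : (pvMissing K (d.insert val i)).card = (pvMissing K d).card - 1 := by
          rw [hmins, Finset.card_erase_of_mem hvm]
        have hcpos : 1 ≤ (pvMissing K d).card := Finset.card_pos.mpr hne
        rw [pv_loopA_cons, if_pos (show 1 ≤ val ∧ val ≤ K from ⟨h1, h2⟩), if_pos hseen,
            pv_buildB_cons, if_pos (show 1 ≤ val ∧ val ≤ K ∧ d.contains val = false from ⟨h1, h2, hcont⟩)]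
        by_cases hdone : (((pvMissing K d).card : Int)) - 1 = 0
        · -- A returns i + 1 here; B's table is complete from now on
          rw [if_pos hdone]
          have hcard1 : (pvMissing K d).card = 1 := by omega
          have hempty : pvMissing K (d.insert val i) = ∅ := by
            obtain ⟨x, hx⟩ := Finset.card_eq_one.mp hcard1
            have : val = x := by
              have := hvm; rw [hx, Finset.mem_singleton] at this; exact this
            rw [hmins, hx, ← this, Finset.erase_singleton]
          have hallin : ∀ c, 1 ≤ c → c ≤ K → (d.insert val i).contains c = true := by
            intro c hc1 hc2
            by_contra hcc
            rw [Bool.not_eq_true] at hcc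
            have hmem : c ∈ pvMissing K (d.insert val i) :=
              (pv_mem_missing _ _ c).mpr ⟨⟨hc1, hc2⟩,
                (PySem.Dict.get?_eq_none_iff_contains _ c).mpr hcc⟩
            rw [hempty] at hmem; cases hmem
          rw [pv_build_noop K _ hallin rest (i + 1)]
          refine (pv_reduce_all _ i _ _ ?_ (by omega) ?_).symm
          · intro c hc
            rw [PySem.List.mem_pyRange_one] at hc
            refine ⟨hallin c hc.1 (by omega), ?_⟩
            rw [PySem.Dict.getD_insert]
            by_cases hcv : c = val
            · simp [hcv]
            · rw [if_neg hcv]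
              rcases h : d.get? c with _ | p
              · rw [PySem.Dict.getD_of_get?_eq_none _ _ h]; omega
              · rw [PySem.Dict.getD_of_get?_eq_some _ _ h]
                exact le_of_lt (hpos c p h).2
          · right
            refine ⟨val, ?_, ?_⟩
            · rw [PySem.List.mem_pyRange_one]; omega
            · rw [PySem.Dict.getD_insert, if_pos rfl]
        · -- recurse with the updated state
          rw [if_neg hdone]
          have hlen' : ((PySem.List.pySetD seen val true).length : Int) = K + 1 := by
            rw [PySem.List.length_pySetD]; exact hlen
          have hcorr' : ∀ c, 1 ≤ c → c ≤ K →
              PySem.List.pyGetD (PySem.List.pySetD seen val true) c false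
                = (d.insert val i).contains c := by
            intro c hc1 hc2
            rw [pv_getD_setD seen val c true false (by omega) (by omega) (by omega) (by omega),
                PySem.Dict.contains_insert]
            by_cases hcv : c = val
            · simp [hcv]
            · have hbeq : (c == val) = false := by simpa using hcv
              rw [if_neg hcv, hbeq, Bool.false_or]
              exact hcorr c hc1 hc2
          have hpos' : ∀ c p, (d.insert val i).get? c = some p → 0 ≤ p ∧ p < i + 1 := by
            intro c p hp
            rw [PySem.Dict.get?_insert] at hp
            by_cases hcv : c = val
            · rw [if_pos hcv] at hp
              have : i = p := by injection hp
              omega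
            · rw [if_neg hcv] at hp
              have := hpos c p hp
              omega
          have hne' : (pvMissing K (d.insert val i)).Nonempty := by
            rw [Finset.nonempty_iff_ne_empty]
            intro h
            rw [h, Finset.card_empty] at hcard
            omega
          have hrem : ((pvMissing K d).card : Int) - 1 = ((pvMissing K (d.insert val i)).card : Int) := by
            rw [hcard]; push_cast [hcpos]; omega
          rw [hrem]
          exact ih (i + 1) _ _ (by omega) hlen' hcorr' hpos' hne'
      · -- already seen: both skip
        have hcont : d.contains val = true := by
          rw [← hcorr val h1 h2]
          cases h : PySem.List.pyGetD seen val false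
          · exact absurd h hseen
          · rfl
        have hguard : ¬ (1 ≤ val ∧ val ≤ K ∧ d.contains val = false) := by
          rintro ⟨_, _, h3⟩; rw [hcont] at h3; cases h3
        rw [pv_loopA_cons, if_pos (show 1 ≤ val ∧ val ≤ K from ⟨h1, h2⟩), if_neg hseen, pv_buildB_cons, if_neg hguard]
        exact ih (i + 1) seen d (by omega) hlen hcorr
          (fun c p hp => by have := hpos c p hp; omega) hne
    · -- out of range: both skip
      have hguard : ¬ (1 ≤ val ∧ val ≤ K ∧ d.contains val = false) := by
        rintro ⟨ha, hb, _⟩; exact hrange ⟨ha, hb⟩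
      rw [pv_loopA_cons, if_neg hrange, pv_buildB_cons, if_neg hguard]
      exact ih (i + 1) seen d (by omega) hlen hcorr
        (fun c p hp => by have := hpos c p hp; omega) hne

-- ===== VERDICT (by name: the statement is the Claim_ definition above) =====
theorem min_purchases_for_candles_spec : Claim_equal_min_purchases_for_candles := by
  intro stack K _
  unfold Spec_min_purchases_for_candles min_purchases_for_candles min_purchases_for_candles_alt
  by_cases hK : K ≤ 0
  · rw [if_pos hK, if_pos hK]
  · have hK1 : 1 ≤ K := by omega
    rw [if_neg hK, if_neg hK]
    have hmiss : pvMissing K PySem.Dict.empty = Finset.Icc 1 K := by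
      ext c
      simp [pv_mem_missing, PySem.Dict.get?_empty, Finset.mem_Icc]
    have hcard : ((pvMissing K PySem.Dict.empty).card : Int) = K := by
      rw [hmiss, Int.card_Icc]
      omega
    have hlen : ((List.replicate (K + 1).toNat false).length : Int) = K + 1 := by
      simp; omega
    have hcorr : ∀ c, 1 ≤ c → c ≤ K →
        PySem.List.pyGetD (List.replicate (K + 1).toNat false) c false
          = (PySem.Dict.empty : PySem.Dict Int Int).contains c := by
      intro c hc1 hc2
      rw [PySem.List.pyGetD_eq_getElem _ _ (by omega) (by rw [hlen]; omega)]
      simp [PySem.Dict.contains_empty]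
    have hne : (pvMissing K PySem.Dict.empty).Nonempty := by
      rw [hmiss]
      exact Finset.nonempty_Icc.mpr (by omega)
    have hmain := pv_main K hK1 stack 0 _ _ le_rfl hlen hcorr
      (fun c p hp => by rw [PySem.Dict.get?_empty] at hp; cases hp) hne
    rw [hcard] at hmain
    exact hmain
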